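-- pv_equiv track=rewrite | github.com/qn06142/coding-python | tripletdigitsum.py | count_good_triples
-- ===== SOURCE A (Python) =====
-- def count_good_triples(n, digsum):
--     digsum_n = digsum[n]
--     count = 0
--
--     # Using modulo 9 property to simplify the problem
--     mod_count = [0] * 9
--
--     for i in range(n + 1):
--         mod_count[digsum[i] % 9] += 1
--
--     for a_mod in range(9):
--         for b_mod in range(9):
--             c_mod = (digsum_n - a_mod - b_mod) % 9
--             if c_mod < 0:
--                 c_mod += 9
--             count += mod_count[a_mod] * mod_count[b_mod] * mod_count[c_mod]
--
--     return count
-- ===== SOURCE B (Python) =====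
-- def count_good_triples(n, digsum):
--     target = digsum[n] % 9
--     count = 0
--     for i in range(n + 1):
--         for j in range(n + 1):
--             for k in range(n + 1):
--                 if (digsum[i] + digsum[j] + digsum[k]) % 9 == target:
--                     count += 1
--     return count
-- ===== Notes on version B (the rewrite author's own statement) =====
-- stated objective: simpler
-- what changed: Replaced the residue histogram plus 9x9 closed-form combination by a direct brute-force count over all ordered index triples (i,j,k) in range(n+1)^3, comparing digit sums mod 9; no histogram array is built.
import Mathlib
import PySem

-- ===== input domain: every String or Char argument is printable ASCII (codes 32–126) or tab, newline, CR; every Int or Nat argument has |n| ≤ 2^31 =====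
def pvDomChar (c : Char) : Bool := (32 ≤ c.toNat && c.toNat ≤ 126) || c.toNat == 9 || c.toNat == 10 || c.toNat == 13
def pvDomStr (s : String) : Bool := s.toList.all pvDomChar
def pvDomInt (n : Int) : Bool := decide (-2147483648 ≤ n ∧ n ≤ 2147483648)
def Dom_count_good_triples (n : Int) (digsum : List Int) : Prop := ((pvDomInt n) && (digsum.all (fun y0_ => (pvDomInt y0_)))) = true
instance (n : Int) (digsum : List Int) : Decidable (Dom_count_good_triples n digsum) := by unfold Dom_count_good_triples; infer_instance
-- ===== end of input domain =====

-- B replaces A's residue histogram + 9x9 closed-form combination by a plain brute-force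
-- count over all ordered index triples (simpler structure; not faster).

-- ===== PORT A =====
def count_good_triples (n : Int) (digsum : List Int) : Int :=
  let digsum_n := PySem.List.pyGetD digsum n 0
  let mod_count : List Int := List.replicate 9 0
  let mod_count := (PySem.List.pyRange 0 (n + 1) 1).foldl
    (fun mc i =>
      PySem.List.pySetD mc (PySem.Int.mod (PySem.List.pyGetD digsum i 0) 9)
        (PySem.List.pyGetD mc (PySem.Int.mod (PySem.List.pyGetD digsum i 0) 9) 0 + 1))
    mod_count
  (PySem.List.pyRange 0 9 1).foldl
    (fun count a_mod =>
      (PySem.List.pyRange 0 9 1).foldl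
        (fun count b_mod =>
          let c_mod := PySem.Int.mod (digsum_n - a_mod - b_mod) 9
          let c_mod := if c_mod < 0 then c_mod + 9 else c_mod
          count + PySem.List.pyGetD mod_count a_mod 0 * PySem.List.pyGetD mod_count b_mod 0 *
            PySem.List.pyGetD mod_count c_mod 0)
        count)
    0

-- ===== PORT B =====
def count_good_triples_alt (n : Int) (digsum : List Int) : Int :=
  let target := PySem.Int.mod (PySem.List.pyGetD digsum n 0) 9
  (PySem.List.pyRange 0 (n + 1) 1).foldl
    (fun count i =>
      (PySem.List.pyRange 0 (n + 1) 1).foldl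
        (fun count j =>
          (PySem.List.pyRange 0 (n + 1) 1).foldl
            (fun count k =>
              if PySem.Int.mod (PySem.List.pyGetD digsum i 0 + PySem.List.pyGetD digsum j 0 +
                    PySem.List.pyGetD digsum k 0) 9 = target then count + 1 else count)
            count)
        count)
    0


-- ===== PRECONDITION & SPEC =====
-- Pre_ excludes exactly the inputs where Python's digsum[n] raises IndexError (both A and B raise there).
def Pre_count_good_triples (n : Int) (digsum : List Int) : Prop :=
  PySem.Raise.InRange digsum.length n
instance (n : Int) (digsum : List Int) : Decidable (Pre_count_good_triples n digsum) := by
  unfold Pre_count_good_triples; infer_instance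
def pvWitness_count_good_triples : Int × List Int := (2, [3, 10, 4])

def Spec_count_good_triples (n : Int) (digsum : List Int) (out : Int) : Prop := out = count_good_triples_alt n digsum
instance (n : Int) (digsum : List Int) (out : Int) : Decidable (Spec_count_good_triples n digsum out) := by unfold Spec_count_good_triples; infer_instance

-- ===== CLAIM (what is proved, stated in full; the proofs are below) =====
def Claim_equal_count_good_triples : Prop := ∀ (n : Int) (digsum : List Int), Dom_count_good_triples n digsum → Pre_count_good_triples n digsum → Spec_count_good_triples n digsum (count_good_triples n digsum)

-- ===== LEMMAS AND PROOFS =====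

def pvCnt (Lst : List Int) (r : Int) : Int := (Lst.countP (fun x => decide (x % 9 = r)) : Nat)

theorem pvCnt_nil (r : Int) : pvCnt [] r = 0 := rfl

theorem pvCnt_cons (x : Int) (L : List Int) (r : Int) :
    pvCnt (x :: L) r = pvCnt L r + (if x % 9 = r then 1 else 0) := by
  simp [pvCnt, List.countP_cons]

theorem delta_sum (f : Int → Int) (r : Int) (h0 : 0 ≤ r) (h9 : r < 9) :
    (([0,1,2,3,4,5,6,7,8] : List Int).map (fun a => (if r = a then (1:Int) else 0) * f a)).sum = f r := by
  have : r = 0 ∨ r = 1 ∨ r = 2 ∨ r = 3 ∨ r = 4 ∨ r = 5 ∨ r = 6 ∨ r = 7 ∨ r = 8 := by omega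
  rcases this with h|h|h|h|h|h|h|h|h <;> subst h <;> norm_num

theorem sum_fiber (f : Int → Int) (Lst : List Int) :
    (Lst.map (fun x => f (x % 9))).sum
      = (([0,1,2,3,4,5,6,7,8] : List Int).map (fun a => pvCnt Lst a * f a)).sum := by
  induction Lst with
  | nil => simp [pvCnt_nil]
  | cons x L ih =>
    have hmem : 0 ≤ x % 9 ∧ x % 9 < 9 := by omega
    calc ((x :: L).map (fun x => f (x % 9))).sum
        = f (x % 9) + (L.map (fun x => f (x % 9))).sum := by simp
      _ = (([0,1,2,3,4,5,6,7,8] : List Int).map (fun a => (if x % 9 = a then (1:Int) else 0) * f a)).sum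
            + (([0,1,2,3,4,5,6,7,8] : List Int).map (fun a => pvCnt L a * f a)).sum := by
            rw [delta_sum f (x % 9) hmem.1 hmem.2, ih]
      _ = (([0,1,2,3,4,5,6,7,8] : List Int).map (fun a => pvCnt (x :: L) a * f a)).sum := by
            simp [pvCnt_cons, add_mul]
            ring_nf

theorem inner_z (t x y : Int) (Lst : List Int) :
    (Lst.map (fun z => if (x + y + z) % 9 = t % 9 then (1:Int) else 0)).sum
      = pvCnt Lst ((t - x - y) % 9) := by
  induction Lst with
  | nil => simp [pvCnt_nil]
  | cons z L ih =>
    simp only [List.map_cons, List.sum_cons, ih, pvCnt_cons]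
    have h : ((x + y + z) % 9 = t % 9) ↔ (z % 9 = (t - x - y) % 9) := by omega
    by_cases hz : z % 9 = (t - x - y) % 9
    · rw [if_pos (h.mpr hz), if_pos hz]; ring
    · rw [if_neg (fun hc => hz (h.mp hc)), if_neg hz]; ring

theorem master (t : Int) (Lst : List Int) :
    (([0,1,2,3,4,5,6,7,8] : List Int).map (fun a =>
      (([0,1,2,3,4,5,6,7,8] : List Int).map (fun b =>
        pvCnt Lst a * pvCnt Lst b * pvCnt Lst ((t - a - b) % 9))).sum)).sum
    = (Lst.map (fun x => (Lst.map (fun y => (Lst.map (fun z =>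
        if (x + y + z) % 9 = t % 9 then (1 : Int) else 0)).sum)).sum)).sum := by
  have step2 : ∀ x : Int, (Lst.map (fun y => pvCnt Lst ((t - x - y) % 9))).sum
      = (([0,1,2,3,4,5,6,7,8] : List Int).map
          (fun b => pvCnt Lst b * pvCnt Lst ((t - x - b) % 9))).sum := by
    intro x
    have h : (Lst.map (fun y => pvCnt Lst ((t - x - y) % 9)))
        = (Lst.map (fun y => (fun b => pvCnt Lst ((t - x - b) % 9)) (y % 9))) := by
      apply List.map_congr_left; intro y _
      have h9 : (t - x - y) % 9 = (t - x - (y % 9)) % 9 := by omega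
      simp only [h9]
    rw [h]; exact sum_fiber (fun b => pvCnt Lst ((t - x - b) % 9)) Lst
  have step3 : ∀ x : Int, (([0,1,2,3,4,5,6,7,8] : List Int).map
        (fun b => pvCnt Lst b * pvCnt Lst ((t - x - b) % 9))).sum
      = (fun a => (([0,1,2,3,4,5,6,7,8] : List Int).map
          (fun b => pvCnt Lst b * pvCnt Lst ((t - a - b) % 9))).sum) (x % 9) := by
    intro x
    simp only []
    apply congrArg
    apply List.map_congr_left; intro b _
    have h9 : (t - x - b) % 9 = (t - (x % 9) - b) % 9 := by omega
    simp only [h9]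
  calc (([0,1,2,3,4,5,6,7,8] : List Int).map (fun a =>
      (([0,1,2,3,4,5,6,7,8] : List Int).map (fun b =>
        pvCnt Lst a * pvCnt Lst b * pvCnt Lst ((t - a - b) % 9))).sum)).sum
      = (([0,1,2,3,4,5,6,7,8] : List Int).map (fun a => pvCnt Lst a *
          (([0,1,2,3,4,5,6,7,8] : List Int).map (fun b =>
            pvCnt Lst b * pvCnt Lst ((t - a - b) % 9))).sum)).sum := by
        apply congrArg; apply List.map_congr_left; intro a _
        rw [← List.sum_map_mul_left]
        apply congrArg; apply List.map_congr_left; intro b _; ring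
    _ = (Lst.map (fun x => (([0,1,2,3,4,5,6,7,8] : List Int).map
          (fun b => pvCnt Lst b * pvCnt Lst ((t - x - b) % 9))).sum)).sum := by
        rw [← sum_fiber (fun a => (([0,1,2,3,4,5,6,7,8] : List Int).map
          (fun b => pvCnt Lst b * pvCnt Lst ((t - a - b) % 9))).sum) Lst]
        apply congrArg; apply List.map_congr_left; intro x _
        exact (step3 x).symm
    _ = _ := by
        apply congrArg; apply List.map_congr_left; intro x _
        rw [← step2 x]
        apply congrArg; apply List.map_congr_left; intro y _
        exact (inner_z t x y Lst).symm


theorem foldl_ite_count (p : Int → Prop) [DecidablePred p] (l : List Int) (c : Int) :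
    l.foldl (fun c x => if p x then c + 1 else c) c
      = c + (l.map (fun x => if p x then (1:Int) else 0)).sum := by
  induction l generalizing c with
  | nil => simp
  | cons x l ih =>
    simp only [List.foldl_cons, List.map_cons, List.sum_cons, ih]
    split_ifs <;> ring

theorem hist_fold (ds : List Int) (idx : List Int) (mc : List Int) (h9 : mc.length = 9)
    (r : Int) (h0 : 0 ≤ r) (hr : r < 9) :
    PySem.List.pyGetD
      (idx.foldl (fun mc i =>
        PySem.List.pySetD mc (PySem.List.pyGetD ds i 0 % 9)
          (PySem.List.pyGetD mc (PySem.List.pyGetD ds i 0 % 9) 0 + 1)) mc) r 0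
    = PySem.List.pyGetD mc r 0 + pvCnt (idx.map (fun i => PySem.List.pyGetD ds i 0)) r := by
  induction idx generalizing mc with
  | nil => simp [pvCnt]
  | cons i l ih =>
    simp only [List.foldl_cons, List.map_cons, pvCnt_cons]
    set x := PySem.List.pyGetD ds i 0 with hx
    have hs : 0 ≤ x % 9 ∧ x % 9 < 9 := by omega
    have hset : PySem.List.pySetD mc (x % 9) (PySem.List.pyGetD mc (x % 9) 0 + 1)
        = mc.set (x % 9).toNat (PySem.List.pyGetD mc (x % 9) 0 + 1) :=
      PySem.List.pySetD_of_nonneg mc _ hs.1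
    rw [ih _ (by rw [hset]; simp [h9])]
    have hget : PySem.List.pyGetD
        (PySem.List.pySetD mc (x % 9) (PySem.List.pyGetD mc (x % 9) 0 + 1)) r 0
        = PySem.List.pyGetD mc r 0 + (if x % 9 = r then 1 else 0) := by
      rw [hset]
      rw [PySem.List.pyGetD_eq_getElem _ _ h0 (by simp [h9]; omega)]
      rw [List.getElem_set]
      by_cases he : x % 9 = r
      · rw [if_pos (by omega), if_pos he]
        simp only [he]
      · rw [if_neg (by omega), if_neg he]
        rw [PySem.List.pyGetD_eq_getElem _ _ h0 (by omega)]
        ring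
    rw [hget]
    ring

theorem key (n : Int) (digsum : List Int) :
    count_good_triples n digsum = count_good_triples_alt n digsum := by
  have mod9 : ∀ a : Int, PySem.Int.mod a 9 = a % 9 :=
    fun a => PySem.Int.mod_eq_emod_of_pos (by norm_num)
  have dead_if : ∀ v : Int, (if v % 9 < 0 then v % 9 + 9 else v % 9) = v % 9 := by
    intro v; rw [if_neg (by omega)]
  have hE : PySem.List.pyRange 0 9 1 = ([0,1,2,3,4,5,6,7,8] : List Int) := by decide
  simp only [count_good_triples, count_good_triples_alt, mod9, dead_if, hE,
    foldl_ite_count, PySem.List.foldl_add, zero_add]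
  have hist9 : ∀ r : Int, 0 ≤ r → r < 9 →
      PySem.List.pyGetD
        (List.foldl (fun mc i =>
            PySem.List.pySetD mc (PySem.List.pyGetD digsum i 0 % 9)
              (PySem.List.pyGetD mc (PySem.List.pyGetD digsum i 0 % 9) 0 + 1))
          (List.replicate 9 0) (PySem.List.pyRange 0 (n + 1) 1)) r 0
      = pvCnt ((PySem.List.pyRange 0 (n + 1) 1).map (fun i => PySem.List.pyGetD digsum i 0)) r := by
    intro r h0 hr
    rw [hist_fold digsum _ _ (by simp) r h0 hr]
    have hz : PySem.List.pyGetD (List.replicate 9 (0:Int)) r 0 = 0 := by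
      rw [PySem.List.pyGetD_eq_getElem _ _ h0 (by simp; omega)]
      exact List.getElem_replicate ..
    rw [hz, zero_add]
  have hmap : ∀ q : Int → Int,
      (PySem.List.pyRange 0 (n + 1) 1).map (fun k => q (PySem.List.pyGetD digsum k 0))
      = ((PySem.List.pyRange 0 (n + 1) 1).map (fun i => PySem.List.pyGetD digsum i 0)).map q := by
    intro q; rw [List.map_map]; rfl
  refine Eq.trans ?_ (Eq.trans (master (PySem.List.pyGetD digsum n 0)
    ((PySem.List.pyRange 0 (n + 1) 1).map (fun i => PySem.List.pyGetD digsum i 0))) ?_)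
  · apply congrArg; apply List.map_congr_left; intro a ha
    apply congrArg; apply List.map_congr_left; intro b hb
    have ha9 : 0 ≤ a ∧ a < 9 := by have := ha; simp at this; omega
    have hb9 : 0 ≤ b ∧ b < 9 := by have := hb; simp at this; omega
    rw [hist9 a ha9.1 ha9.2, hist9 b hb9.1 hb9.2, hist9 _ (by omega) (by omega)]
  · rw [← hmap (fun x =>
      (((PySem.List.pyRange 0 (n + 1) 1).map (fun i => PySem.List.pyGetD digsum i 0)).map (fun y =>
        (((PySem.List.pyRange 0 (n + 1) 1).map (fun i => PySem.List.pyGetD digsum i 0)).map (fun z =>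
          if (x + y + z) % 9 = PySem.List.pyGetD digsum n 0 % 9 then (1 : Int) else 0)).sum)).sum)]
    apply congrArg; apply List.map_congr_left; intro i _
    dsimp only
    rw [← hmap (fun y =>
      (((PySem.List.pyRange 0 (n + 1) 1).map (fun i => PySem.List.pyGetD digsum i 0)).map (fun z =>
        if (PySem.List.pyGetD digsum i 0 + y + z) % 9 = PySem.List.pyGetD digsum n 0 % 9 then (1 : Int) else 0)).sum)]
    apply congrArg; apply List.map_congr_left; intro j _
    dsimp only
    rw [← hmap (fun z =>
      if (PySem.List.pyGetD digsum i 0 + PySem.List.pyGetD digsum j 0 + z) % 9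
          = PySem.List.pyGetD digsum n 0 % 9 then (1 : Int) else 0)]

-- ===== VERDICT (by name: the statement is the Claim_ definition above) =====
theorem count_good_triples_spec : Claim_equal_count_good_triples := by
  intro n digsum _ _
  unfold Spec_count_good_triples
  exact key n digsum
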